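-- pv_equiv track=rewrite | github.com/DanKolganov/BatsynAssignment1 | assignment_1.py | min_degree_first_clique_2
-- ===== SOURCE A (Python) =====
-- def check_clique(graph : dict, vertices : list) -> bool:
--     for i in range(len(vertices)):
--         for j in range(i+1, len(vertices)):
--             if vertices[j] not in graph[vertices[i]]:
--                 return False
--     return True
--
-- def min_degree_first_clique_2(graph: dict) -> list:
--     cliques = []
--
--     # Создаем рабочие копии
--     working_graph = {k: set(v) for k, v in graph.items()}
--     vertices_and_degrees_origin = {v: len(neighbors) for v, neighbors in working_graph.items()}
--
--     while vertices_and_degrees_origin: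
--         # Создаем копии для текущей итерации
--         current_graph = {k: v.copy() for k, v in working_graph.items()}
--         vertices_and_degrees = vertices_and_degrees_origin.copy()
--
--         clique_found = False
--
--         while vertices_and_degrees and not clique_found:
--
--             # Находим вершину с минимальной степенью
--             min_vertex = min(vertices_and_degrees, key=vertices_and_degrees.get)
--
--             # Сохраняем соседей ДО изменений
--             neighbors_of_min = current_graph[min_vertex].copy()
--
--             # Удаляем min_vertex из графа и обновляем соседей
--             for neighbor in neighbors_of_min:
--                 if neighbor in vertices_and_degrees:
--                     vertices_and_degrees[neighbor] -= 1
--                     current_graph[neighbor].discard(min_vertex)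
--
--             # Удаляем саму вершину
--             del vertices_and_degrees[min_vertex]
--             del current_graph[min_vertex]
--
--
--             # Проверяем, является ли текущий набор кликой
--             current_vertices = list(vertices_and_degrees.keys())
--
--             if current_vertices and check_clique(current_graph, current_vertices):
--                 cliques.append(current_vertices.copy())
--                 # Удаляем вершины клики из origin
--                 for vertex in current_vertices:
--                     if vertex in vertices_and_degrees_origin:
--                         del vertices_and_degrees_origin[vertex]
--                 clique_found = True
--
--         # Если клика не найдена в этой итерации, прерываем цикл
--         if not clique_found:
--             break
--
--     return cliques
-- ===== SOURCE B (Python) =====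
-- def min_degree_first_clique_2(graph: dict) -> list:
--     # Same greedy min-degree elimination, but the all-pairs clique rescan after
--     # every removal is replaced by an incrementally maintained count m of missing
--     # ordered pairs (the remaining vertices form a clique iff m == 0), and the
--     # per-restart graph copies disappear: the original adjacency suffices, because
--     # vertices removed in a restart are never queried again.
--     adj = {k: set(v) for k, v in graph.items()}
--     alive = {v: len(s) for v, s in adj.items()}  # remaining vertices -> original degree
--     cliques = []
--     while alive:
--         degs = dict(alive)
--         rem = list(degs)
--         # count the missing ordered pairs once per restart
--         m = 0
--         tail = rem
--         while tail:
--             u, tail = tail[0], tail[1:]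
--             for w in tail:
--                 if w not in adj[u]:
--                     m += 1
--         found = False
--         while degs and not found:
--             v = min(degs, key=degs.get)
--             # subtract the missing pairs that involve v (direction follows list order)
--             i = rem.index(v)
--             for u in rem[:i]:
--                 if v not in adj[u]:
--                     m -= 1
--             for w in rem[i + 1:]:
--                 if w not in adj[v]:
--                     m -= 1
--             for u in adj[v]:
--                 if u in degs:
--                     degs[u] -= 1
--             del degs[v]
--             rem.pop(i)
--             if rem and m == 0:
--                 cliques.append(rem.copy())
--                 for u in rem:
--                     del alive[u]
--                 found = True
--         if not found:
--             break
--     return cliques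
-- ===== Notes on version B (the rewrite author's own statement) =====
-- stated objective: alternative
-- what changed: B decides 'remaining vertices form a clique' from an incrementally maintained count of missing vertex pairs (clique iff the count is zero) instead of A's all-pairs rescan after every removal, and works on the original adjacency plus a remaining-vertex list instead of A's per-restart graph/degree copies; it trades A's early-exit rescan for deterministic per-removal bookkeeping and was not measured faster (the shared min-degree scan dominates both).
import Mathlib
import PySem

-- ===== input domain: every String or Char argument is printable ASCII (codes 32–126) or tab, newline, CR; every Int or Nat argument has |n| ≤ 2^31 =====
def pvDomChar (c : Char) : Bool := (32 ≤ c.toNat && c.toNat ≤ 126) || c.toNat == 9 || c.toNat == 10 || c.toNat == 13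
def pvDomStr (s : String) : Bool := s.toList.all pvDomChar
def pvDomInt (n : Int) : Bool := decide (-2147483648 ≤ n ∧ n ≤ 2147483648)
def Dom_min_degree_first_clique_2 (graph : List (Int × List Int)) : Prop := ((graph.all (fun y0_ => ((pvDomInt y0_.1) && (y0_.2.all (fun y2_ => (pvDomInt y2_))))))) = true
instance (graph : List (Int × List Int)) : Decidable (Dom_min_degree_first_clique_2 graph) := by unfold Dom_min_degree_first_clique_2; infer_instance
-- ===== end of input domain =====

-- ===== PORT A =====
-- One honest line: B replaces A's all-pairs clique rescan after every removal by an
-- incrementally maintained count of missing vertex pairs and drops A's per-restart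
-- graph copies (an alternative algorithm, not measured faster); same greedy
-- elimination, same return value.

-- shared first lines of both Pythons: working_graph/adj = {k: set(v) for k, v in graph.items()}
def pvAdj (graph : List (Int × List Int)) : PySem.Dict Int (PySem.Set Int) :=
  graph.foldl (fun d p => d.insert p.1 (PySem.Set.ofList p.2)) PySem.Dict.empty

-- {v: len(neighbors) for v, neighbors in working_graph.items()}
def pvDeg (wg : PySem.Dict Int (PySem.Set Int)) : PySem.Dict Int Int :=
  wg.items.foldl (fun d p => d.insert p.1 (PySem.List.len p.2)) PySem.Dict.empty

-- graph[...] is ported with getD: in every call the key is present (KeyError unreachable);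
-- the early 'return False' is List.all.
def check_clique (g : PySem.Dict Int (PySem.Set Int)) (vertices : List Int) : Bool :=
  (PySem.List.pyRange 0 (PySem.List.len vertices) 1).all (fun i =>
    (PySem.List.pyRange (i + 1) (PySem.List.len vertices) 1).all (fun j =>
      PySem.Set.contains (g.getD (PySem.List.pyGetD vertices i 0) PySem.Set.empty)
        (PySem.List.pyGetD vertices j 0)))

-- the inner 'while vertices_and_degrees and not clique_found' loop; returns the clique if found.
-- Python iterates 'for neighbor in neighbors_of_min' over a set (hash order); the loop only
-- decrements counters / discards, so the resulting dicts are iteration-order independent and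
-- we fold over the Set's list.  Fuel: one vertex is deleted per pass, so vad.size passes suffice.
def pvInnerA (cg : PySem.Dict Int (PySem.Set Int)) (vad : PySem.Dict Int Int) :
    Nat → Option (List Int)
  | 0 => none
  | fuel + 1 =>
    if vad.size = 0 then none
    else
      -- min_vertex = min(vertices_and_degrees, key=vertices_and_degrees.get)  (first minimal key)
      let min_vertex := PySem.List.minD vad.keys (fun k => vad.getD k 0) 0
      let neighbors_of_min := cg.getD min_vertex PySem.Set.empty
      let st := neighbors_of_min.foldl
        (fun (s : PySem.Dict Int Int × PySem.Dict Int (PySem.Set Int)) n =>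
          if s.1.contains n then
            (s.1.modify n 0 (fun x => x - 1),
             s.2.modify n PySem.Set.empty (fun t => PySem.Set.discard t min_vertex))
          else s) (vad, cg)
      let vad2 := st.1.erase min_vertex
      let cg2 := st.2.erase min_vertex
      let current_vertices := vad2.keys
      if !current_vertices.isEmpty && check_clique cg2 current_vertices then
        some current_vertices
      else pvInnerA cg2 vad2 fuel

-- the outer 'while vertices_and_degrees_origin' loop (current_graph = fresh copy of
-- working_graph each pass; a copy of a pure value is the value itself)
def pvOuterA (wg : PySem.Dict Int (PySem.Set Int)) (origin : PySem.Dict Int Int)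
    (cliques : List (List Int)) : Nat → List (List Int)
  | 0 => cliques
  | fuel + 1 =>
    if origin.size = 0 then cliques
    else
      match pvInnerA wg origin origin.size with
      | some cur =>
          -- for vertex in current_vertices: if vertex in origin: del origin[vertex]
          pvOuterA wg (cur.foldl (fun d v => if d.contains v then d.erase v else d) origin)
            (cliques ++ [cur]) fuel
      | none => cliques

def min_degree_first_clique_2 (graph : List (Int × List Int)) : List (List Int) :=
  let working_graph := pvAdj graph
  let origin := pvDeg working_graph
  pvOuterA working_graph origin [] (origin.size + 1)

-- ===== PORT B =====

-- m-initialisation: tail = rem; while tail: u, tail = tail[0], tail[1:]; for w in tail: ...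
def pvInitMiss (adj : PySem.Dict Int (PySem.Set Int)) : List Int → Int → Int
  | [], m => m
  | u :: tail, m =>
      pvInitMiss adj tail
        (tail.foldl
          (fun m w =>
            if !PySem.Set.contains (adj.getD u PySem.Set.empty) w then m + 1 else m) m)

-- the inner 'while degs and not found' loop of B; returns the clique if found.
-- rem.index(v) / rem.pop(i) always succeed (v is a key of degs, hence in rem), so the
-- Option results are unwrapped with getD/defaults that are never used.
def pvInnerB (adj : PySem.Dict Int (PySem.Set Int)) (degs : PySem.Dict Int Int)
    (rem : List Int) (m : Int) : Nat → Option (List Int)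
  | 0 => none
  | fuel + 1 =>
    if degs.size = 0 then none
    else
      let v := PySem.List.minD degs.keys (fun k => degs.getD k 0) 0
      let i : Nat := (PySem.List.index? rem v).getD 0                      -- i = rem.index(v)
      -- for u in rem[:i]: if v not in adj[u]: m -= 1
      let m := (PySem.List.slice rem none (some (i : Int))).foldl
        (fun m u =>
          if !PySem.Set.contains (adj.getD u PySem.Set.empty) v then m - 1 else m) m
      -- for w in rem[i+1:]: if w not in adj[v]: m -= 1
      let m := (PySem.List.slice rem (some ((i : Int) + 1)) none).foldl
        (fun m w =>
          if !PySem.Set.contains (adj.getD v PySem.Set.empty) w then m - 1 else m) m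
      -- for u in adj[v]: if u in degs: degs[u] -= 1   (order-independent decrements)
      let degs := (adj.getD v PySem.Set.empty).foldl
        (fun d u => if d.contains u then d.modify u 0 (fun x => x - 1) else d) degs
      let degs := degs.erase v                                             -- del degs[v]
      let rem := ((PySem.List.pop? rem (i : Int)).map (fun r => r.2)).getD rem  -- rem.pop(i)
      if !rem.isEmpty && m == 0 then some rem
      else pvInnerB adj degs rem m fuel

-- the outer 'while alive' loop of B
def pvOuterB (adj : PySem.Dict Int (PySem.Set Int)) (alive : PySem.Dict Int Int)
    (cliques : List (List Int)) : Nat → List (List Int)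
  | 0 => cliques
  | fuel + 1 =>
    if alive.size = 0 then cliques
    else
      let degs := alive
      let rem := degs.keys
      let m := pvInitMiss adj rem 0
      match pvInnerB adj degs rem m rem.length with
      | some cur =>
          -- for u in cur: del alive[u]   (every u is a key of alive)
          pvOuterB adj (cur.foldl (fun d u => d.erase u) alive) (cliques ++ [cur]) fuel
      | none => cliques

def min_degree_first_clique_2_alt (graph : List (Int × List Int)) : List (List Int) :=
  let adj := pvAdj graph
  let alive := pvDeg adj
  pvOuterB adj alive [] (alive.size + 1)

-- ===== PRECONDITION & SPEC =====
def Spec_min_degree_first_clique_2 (graph : List (Int × List Int)) (out : List (List Int)) : Prop := out = min_degree_first_clique_2_alt graph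
instance (graph : List (Int × List Int)) (out : List (List Int)) : Decidable (Spec_min_degree_first_clique_2 graph out) := by unfold Spec_min_degree_first_clique_2; infer_instance

-- ===== CLAIM (what is proved, stated in full; the proofs are below) =====
def Claim_equal_min_degree_first_clique_2 : Prop := ∀ (graph : List (Int × List Int)), Dom_min_degree_first_clique_2 graph → Spec_min_degree_first_clique_2 graph (min_degree_first_clique_2 graph)

-- ===== LEMMAS AND PROOFS =====

-- the number of ordered pairs (earlier, later) of vs that are NOT edges of g
def missCount (g : PySem.Dict Int (PySem.Set Int)) : List Int → Nat
  | [] => 0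
  | u :: t =>
      t.countP (fun w => !PySem.Set.contains (g.getD u PySem.Set.empty) w) + missCount g t

-- ---- small Dict facts (the prelude has no erase lemmas) ----

theorem pv_keys_erase {ν : Type} (d : PySem.Dict Int ν) (k : Int) :
    (d.erase k).keys = d.keys.filter (fun x => !(x == k)) := by
  simp [PySem.Dict.erase, PySem.Dict.keys, List.filter_map]
  rfl

theorem pv_getD_erase_of_ne {ν : Type} (d : PySem.Dict Int ν) (k k' : Int) (dflt : ν)
    (h : k' ≠ k) : (d.erase k).getD k' dflt = d.getD k' dflt := by
  simp [PySem.Dict.getD, PySem.Dict.get?, PySem.Dict.erase]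
  induction d.items with
  | nil => rfl
  | cons p t ih =>
    by_cases hp : p.1 = k
    · simp [hp, Ne.symm h, ih]
    · by_cases hk' : p.1 = k'
      · simp [hk', h]
      · simp [hp, hk', ih]

theorem pv_getD_erase_self {ν : Type} (d : PySem.Dict Int ν) (k : Int) (dflt : ν) :
    (d.erase k).getD k dflt = dflt := by
  simp [PySem.Dict.getD, PySem.Dict.get?, PySem.Dict.erase]
  induction d.items with
  | nil => rfl
  | cons p t ih =>
    by_cases hp : p.1 = k
    · simp [ih]
    · simp [ih]

-- ---- small list facts ----

theorem pv_pairwise_congr (l : List Int) (R S : Int → Int → Prop)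
    (h : ∀ a ∈ l, ∀ b ∈ l, (R a b ↔ S a b)) : l.Pairwise R ↔ l.Pairwise S := by
  constructor <;> intro hp
  · induction hp with
    | nil => exact List.Pairwise.nil
    | @cons a t ha hp ih =>
      refine List.Pairwise.cons ?_ (ih (fun x hx y hy => h x (by simp [hx]) y (by simp [hy])))
      intro b hb
      exact (h a (by simp) b (by simp [hb])).1 (ha b hb)
  · induction hp with
    | nil => exact List.Pairwise.nil
    | @cons a t ha hp ih =>
      refine List.Pairwise.cons ?_ (ih (fun x hx y hy => h x (by simp [hx]) y (by simp [hy])))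
      intro b hb
      exact (h a (by simp) b (by simp [hb])).2 (ha b hb)

theorem pv_filter_out (l : List Int) (v : Int) (hv : v ∉ l) :
    l.filter (fun x => !(x == v)) = l := by
  rw [List.filter_eq_self]
  intro a ha
  simp
  exact fun h => hv (h ▸ ha)

theorem pv_eraseIdx_mid (v : Int) : ∀ (pre suf : List Int),
    (pre ++ v :: suf).eraseIdx pre.length = pre ++ suf := by
  intro pre
  induction pre with
  | nil => intro suf; simp
  | cons a t ih => intro suf; simp [ih]

theorem pv_pairFold_eq (mv : Int) :
    ∀ (ℓ : List Int) (d : PySem.Dict Int Int) (g : PySem.Dict Int (PySem.Set Int)),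
    ℓ.foldl
      (fun (s : PySem.Dict Int Int × PySem.Dict Int (PySem.Set Int)) n =>
        if s.1.contains n then
          (s.1.modify n 0 (fun x => x - 1),
           s.2.modify n PySem.Set.empty (fun t => PySem.Set.discard t mv))
        else s) (d, g)
      = (ℓ.foldl (fun d n => if d.contains n then d.modify n 0 (fun x => x - 1) else d) d,
         ℓ.foldl (fun g n => if d.contains n then g.modify n PySem.Set.empty
             (fun t => PySem.Set.discard t mv) else g) g) := by
  intro ℓ
  induction ℓ with
  | nil => intro d g; rfl
  | cons n t ih =>
    intro d g
    simp only [List.foldl_cons]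
    by_cases h : d.contains n = true
    · simp only [h, if_true]
      rw [ih]
      congr 1
      apply PySem.List.foldl_congr_mem
      intro acc x hx
      have : (d.modify n 0 (fun x => x - 1)).contains x = d.contains x := by
        simp [PySem.Dict.contains_modify]
        intro hx'
        simp [hx', h]
      rw [this]
    · simp only [h, if_false, Bool.false_eq_true]
      rw [ih]

-- ---- the decrement fold: items pointwise, keys unchanged ----

theorem pv_items_decStep (d : PySem.Dict Int Int) (hd : d.keys.Nodup) (n : Int) :
    (if d.contains n then d.modify n 0 (fun x => x - 1) else d).items
      = d.items.map (fun p => if p.1 = n then (p.1, p.2 - 1) else p) := by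
  by_cases h : d.contains n = true
  · simp only [h, if_true, PySem.Dict.modify]
    rw [PySem.Dict.items_insert_of_contains d _ h]
    apply List.map_congr_left
    intro p hp
    by_cases hn : p.1 = n
    · have : d.getD n 0 = p.2 := by
        apply PySem.Dict.getD_of_mem_items d (k := n) (v := p.2) _ hd
        rw [← hn]; exact hp
      simp [hn, this]
    · simp [hn]
  · simp only [h]
    rw [if_neg (by simp)]
    simp [PySem.Dict.contains, List.any_eq_true] at h
    have : ∀ p ∈ d.items, p.1 ≠ n := by
      intro p hp hn
      have hmem : (p.1, p.2) ∈ d.items := by simpa using hp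
      rw [hn] at hmem
      exact h p.2 hmem
    conv_lhs => rw [← List.map_id d.items]
    apply List.map_congr_left
    intro p hp
    simp [this p hp]

theorem pv_keys_decStep (d : PySem.Dict Int Int) (hd : d.keys.Nodup) (n : Int) :
    (if d.contains n then d.modify n 0 (fun x => x - 1) else d).keys = d.keys := by
  simp only [PySem.Dict.keys, pv_items_decStep d hd n, List.map_map]
  apply List.map_congr_left
  intro p hp
  by_cases hn : p.1 = n <;> simp [hn]

theorem pv_items_decFold (ℓ : List Int) (hl : ℓ.Nodup) :
    ∀ (d : PySem.Dict Int Int), d.keys.Nodup →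
    (ℓ.foldl (fun d n => if d.contains n then d.modify n 0 (fun x => x - 1) else d) d).items
      = d.items.map (fun p => if p.1 ∈ ℓ then (p.1, p.2 - 1) else p) := by
  induction ℓ with
  | nil =>
    intro d _
    simp
  | cons n t ih =>
    intro d hd
    have hnt : n ∉ t := (List.nodup_cons.1 hl).1
    have ht : t.Nodup := (List.nodup_cons.1 hl).2
    simp only [List.foldl_cons]
    have hkeys : (if d.contains n then d.modify n 0 (fun x => x - 1) else d).keys = d.keys :=
      pv_keys_decStep d hd n
    rw [ih ht _ (hkeys ▸ hd), pv_items_decStep d hd n, List.map_map]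
    apply List.map_congr_left
    intro p hp
    by_cases hn : p.1 = n
    · simp [hn, hnt]
    · by_cases hmem : p.1 ∈ t <;> simp [hn, hmem]

theorem pv_keys_decFold (ℓ : List Int) (hl : ℓ.Nodup) (d : PySem.Dict Int Int)
    (hd : d.keys.Nodup) :
    (ℓ.foldl (fun d n => if d.contains n then d.modify n 0 (fun x => x - 1) else d) d).keys
      = d.keys := by
  simp only [PySem.Dict.keys, pv_items_decFold ℓ hl d hd, List.map_map]
  apply List.map_congr_left
  intro p hp
  by_cases hn : p.1 ∈ ℓ <;> simp [hn]

theorem pv_decFold_congr (d : PySem.Dict Int Int) (hd : d.keys.Nodup)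
    (ℓ₁ ℓ₂ : List Int) (h₁ : ℓ₁.Nodup) (h₂ : ℓ₂.Nodup)
    (hiff : ∀ k ∈ d.keys, (k ∈ ℓ₁ ↔ k ∈ ℓ₂)) :
    ℓ₁.foldl (fun d n => if d.contains n then d.modify n 0 (fun x => x - 1) else d) d
      = ℓ₂.foldl (fun d n => if d.contains n then d.modify n 0 (fun x => x - 1) else d) d := by
  apply PySem.Dict.ext
  rw [pv_items_decFold ℓ₁ h₁ d hd, pv_items_decFold ℓ₂ h₂ d hd]
  apply List.map_congr_left
  intro p hp
  have hk : p.1 ∈ d.keys := by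
    simp [PySem.Dict.keys]
    exact ⟨p.2, hp⟩
  by_cases hmem : p.1 ∈ ℓ₁
  · simp [hmem, (hiff p.1 hk).1 hmem]
  · have hm2 : p.1 ∉ ℓ₂ := fun h => hmem ((hiff p.1 hk).2 h)
    simp [hmem, hm2]

-- ---- the discard fold of A only ever removes min_vertex from adjacency sets ----

theorem pv_discardFold_contains (mv : Int) (d0 : PySem.Dict Int Int) :
    ∀ (ℓ : List Int) (g : PySem.Dict Int (PySem.Set Int)) (u x : Int), x ≠ mv →
    PySem.Set.contains
      ((ℓ.foldl (fun g n => if d0.contains n then g.modify n PySem.Set.empty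
          (fun t => PySem.Set.discard t mv) else g) g).getD u PySem.Set.empty) x
      = PySem.Set.contains (g.getD u PySem.Set.empty) x := by
  intro ℓ
  induction ℓ with
  | nil => intro g u x _; rfl
  | cons n t ih =>
    intro g u x hx
    simp only [List.foldl_cons]
    rw [ih _ u x hx]
    by_cases h : d0.contains n = true
    · simp only [h, if_true]
      rw [PySem.Dict.getD_modify]
      by_cases hu : u = n
      · subst hu
        simp [PySem.Set.contains, PySem.Set.discard, hx]
      · simp [hu]
    · simp [h]

theorem pv_discardFold_nodup (mv : Int) (d0 : PySem.Dict Int Int) :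
    ∀ (ℓ : List Int) (g : PySem.Dict Int (PySem.Set Int)),
    (∀ u, (g.getD u PySem.Set.empty).Nodup) →
    ∀ u, ((ℓ.foldl (fun g n => if d0.contains n then g.modify n PySem.Set.empty
        (fun t => PySem.Set.discard t mv) else g) g).getD u PySem.Set.empty).Nodup := by
  intro ℓ
  induction ℓ with
  | nil => intro g hg u; exact hg u
  | cons n t ih =>
    intro g hg u
    simp only [List.foldl_cons]
    apply ih
    intro v
    by_cases h : d0.contains n = true
    · simp only [h, if_true]
      rw [PySem.Dict.getD_modify]
      by_cases hv : v = n
      · simp only [hv, if_true]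
        exact PySem.Set.nodup_discard _ _ (hg n)
      · simp only [hv, if_false]
        exact hg v
    · simp only [h, if_false, Bool.false_eq_true]
      exact hg v

-- ---- counting folds ----

theorem pv_foldl_if_sub_one {α : Type} (p : α → Bool) :
    ∀ (l : List α) (a : Int),
    l.foldl (fun acc x => if p x then acc - 1 else acc) a = a - (l.countP p : Int) := by
  intro l
  induction l with
  | nil => intro a; simp
  | cons x t ih =>
    intro a
    by_cases h : p x = true
    · simp [h, ih]
      omega
    · simp [h, ih]

theorem pv_initMiss_eq (adj : PySem.Dict Int (PySem.Set Int)) :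
    ∀ (t : List Int) (m : Int), pvInitMiss adj t m = m + (missCount adj t : Int) := by
  intro t
  induction t with
  | nil => intro m; simp [pvInitMiss, missCount]
  | cons u tail ih =>
    intro m
    rw [pvInitMiss, ih, PySem.List.foldl_if_add_one, missCount]
    push_cast
    ring

theorem pv_missCount_middle (g : PySem.Dict Int (PySem.Set Int)) (v : Int) :
    ∀ (pre suf : List Int),
    missCount g (pre ++ v :: suf)
      = missCount g (pre ++ suf)
        + pre.countP (fun u => !PySem.Set.contains (g.getD u PySem.Set.empty) v)
        + suf.countP (fun w => !PySem.Set.contains (g.getD v PySem.Set.empty) w) := by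
  intro pre
  induction pre with
  | nil => intro suf; simp [missCount]; omega
  | cons u pre ih =>
    intro suf
    simp only [List.cons_append, missCount, ih, List.countP_cons, List.countP_append]
    by_cases h : PySem.Set.contains (g.getD u PySem.Set.empty) v = true
    · simp
      omega
    · simp
      omega

-- ---- clique-test characterisations ----

theorem pv_check_clique_iff (g : PySem.Dict Int (PySem.Set Int)) (vs : List Int) :
    check_clique g vs = true
      ↔ vs.Pairwise (fun a b => PySem.Set.contains (g.getD a PySem.Set.empty) b = true) := by
  rw [List.pairwise_iff_getElem]
  simp only [check_clique, List.all_eq_true, PySem.List.mem_pyRange_one, PySem.List.len_eq]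
  constructor
  · intro h i j hi hj hij
    have h1 := h (i : Int) ⟨by omega, by exact_mod_cast hi⟩ (j : Int)
      ⟨by exact_mod_cast (by omega : (i : Int) + 1 ≤ (j : Int)), by exact_mod_cast hj⟩
    rw [PySem.List.pyGetD_eq_getElem vs (0 : Int) (by omega) (by exact_mod_cast hi),
        PySem.List.pyGetD_eq_getElem vs (0 : Int) (by omega) (by exact_mod_cast hj)] at h1
    simpa using h1
  · intro h i hi j hj
    have h0i : 0 ≤ i := hi.1
    have h0j : 0 ≤ j := by omega
    rw [PySem.List.pyGetD_eq_getElem vs (0 : Int) h0i (by exact_mod_cast hi.2),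
        PySem.List.pyGetD_eq_getElem vs (0 : Int) h0j (by exact_mod_cast hj.2)]
    apply h
    · omega

theorem pv_missCount_eq_zero_iff (g : PySem.Dict Int (PySem.Set Int)) (vs : List Int) :
    missCount g vs = 0
      ↔ vs.Pairwise (fun a b => PySem.Set.contains (g.getD a PySem.Set.empty) b = true) := by
  induction vs with
  | nil => simp [missCount]
  | cons u t ih =>
    simp only [missCount, Nat.add_eq_zero_iff, List.countP_eq_zero, List.pairwise_cons, ih]
    constructor
    · rintro ⟨h1, h2⟩
      refine ⟨fun w hw => by simpa using h1 w hw, h2⟩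
    · rintro ⟨h1, h2⟩
      refine ⟨fun w hw => by
        have := h1 w hw
        simp at this
        simp [this], h2⟩

-- ---- the initial dictionaries ----

theorem pv_nodup_keys_pvDeg (wg : PySem.Dict Int (PySem.Set Int)) : (pvDeg wg).keys.Nodup :=
  PySem.Dict.nodup_keys_foldl_insert_key wg.items Prod.fst _ _ PySem.Dict.nodup_keys_empty

theorem pv_nodup_values_pvAdj (graph : List (Int × List Int)) :
    ∀ u, ((pvAdj graph).getD u PySem.Set.empty).Nodup := by
  unfold pvAdj
  suffices h : ∀ (l : List (Int × List Int)) (d : PySem.Dict Int (PySem.Set Int)),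
      (∀ u, (d.getD u PySem.Set.empty).Nodup) →
      ∀ u, ((l.foldl (fun d p => d.insert p.1 (PySem.Set.ofList p.2)) d).getD u
        PySem.Set.empty).Nodup by
    apply h
    intro u
    simp [PySem.Dict.getD_empty]
  intro l
  induction l with
  | nil => intro d hd u; exact hd u
  | cons p t ih =>
    intro d hd u
    simp only [List.foldl_cons]
    apply ih
    intro v
    rw [PySem.Dict.getD_insert]
    by_cases hv : v = p.1
    · simp [hv, PySem.Set.nodup_ofList]
    · simp only [hv, if_false]
      exact hd v

-- ---- the erase-folds on origin/alive: A's guarded form equals B's plain form ----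

theorem pv_eraseFold_eq :
    ∀ (ℓ : List Int) (d : PySem.Dict Int Int),
    ℓ.foldl (fun d v => if d.contains v then d.erase v else d) d
      = ℓ.foldl (fun d v => d.erase v) d := by
  intro ℓ
  induction ℓ with
  | nil => intro d; rfl
  | cons n t ih =>
    intro d
    simp only [List.foldl_cons]
    by_cases h : d.contains n = true
    · simp [h, ih]
    · rw [if_neg (by simp [h]), ih]
      congr 1
      apply PySem.Dict.ext
      simp only [PySem.Dict.erase]
      rw [eq_comm, List.filter_eq_self]
      intro p hp
      simp [PySem.Dict.contains, List.any_eq_true] at h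
      rcases p with ⟨a, b⟩
      simp only [Bool.not_eq_eq_eq_not, Bool.not_true, beq_eq_false_iff_ne, ne_eq]
      intro hn
      subst hn
      exact h b hp

theorem pv_eraseFold_nodup :
    ∀ (ℓ : List Int) (d : PySem.Dict Int Int), d.keys.Nodup →
    (ℓ.foldl (fun d v => d.erase v) d).keys.Nodup := by
  intro ℓ
  induction ℓ with
  | nil => intro d hd; exact hd
  | cons n t ih =>
    intro d hd
    simp only [List.foldl_cons]
    apply ih
    rw [pv_keys_erase]
    exact hd.filter _

-- ---- the inner loops agree ----

theorem pv_inner_eq (wg : PySem.Dict Int (PySem.Set Int))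
    (hvw : ∀ u, (wg.getD u PySem.Set.empty).Nodup) :
    ∀ (fuel : Nat) (cg : PySem.Dict Int (PySem.Set Int)) (vad : PySem.Dict Int Int) (m : Int),
    vad.keys.Nodup →
    (∀ u, (cg.getD u PySem.Set.empty).Nodup) →
    (∀ u ∈ vad.keys, ∀ x ∈ vad.keys,
      PySem.Set.contains (cg.getD u PySem.Set.empty) x
        = PySem.Set.contains (wg.getD u PySem.Set.empty) x) →
    m = (missCount wg vad.keys : Int) →
    pvInnerA cg vad fuel = pvInnerB wg vad vad.keys m fuel := by
  intro fuel
  induction fuel with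
  | zero => intro cg vad m _ _ _ _; rfl
  | succ fuel ih =>
    intro cg vad m hnd hcgN hsub hm
    rw [pvInnerA, pvInnerB]
    by_cases hz : vad.size = 0
    · simp [hz]
    · rw [if_neg hz, if_neg hz]
      simp only []
      set mv := PySem.List.minD vad.keys (fun k => vad.getD k 0) 0 with hmv
      have hne : vad.keys ≠ [] := by
        intro h
        apply hz
        have hit : vad.items = [] := by simpa [PySem.Dict.keys] using h
        simp [PySem.Dict.size, hit]
      have hmem : mv ∈ vad.keys := PySem.List.minD_mem _ _ _ hne
      obtain ⟨i0, hidx⟩ := Option.isSome_iff_exists.1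
        ((PySem.List.index?_isSome_iff (xs := vad.keys) (v := mv)).2 hmem)
      obtain ⟨pre, suf, hsplit, hlen, hpre⟩ := (PySem.List.index?_eq_some_iff _ _ _).1 hidx
      have hnodups : (pre ++ mv :: suf).Nodup := hsplit ▸ hnd
      have hsuf : mv ∉ suf := by
        have h2 : (mv :: suf).Nodup := (List.nodup_append.1 hnodups).2.1
        exact (List.nodup_cons.1 h2).1
      have hps : (pre ++ suf).Nodup :=
        (((List.Sublist.refl pre).append (List.sublist_cons_self mv suf)).nodup) hnodups
      have hi : (PySem.List.index? vad.keys mv).getD 0 = pre.length := by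
        rw [hidx, ← hlen]; rfl
      have hslice1 : PySem.List.slice vad.keys none (some ((pre.length : Nat) : Int)) = pre := by
        rw [PySem.List.slice_to_natCast, hsplit, List.take_left]
      have hslice2 :
          PySem.List.slice vad.keys (some (((pre.length : Nat) : Int) + 1)) none = suf := by
        have hcast : ((pre.length : Int) + 1) = (((pre.length + 1 : Nat)) : Int) := by
          push_cast; ring
        rw [hcast, PySem.List.slice_from_natCast, hsplit,
          show pre ++ mv :: suf = (pre ++ [mv]) ++ suf by simp,
          show pre.length + 1 = (pre ++ [mv]).length by simp]
        exact List.drop_left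
      have hlt : pre.length < vad.keys.length := by rw [hsplit]; simp
      have herase : vad.keys.eraseIdx pre.length = pre ++ suf := by
        rw [hsplit]; exact pv_eraseIdx_mid mv pre suf
      have hpop :
          (Option.map (fun r => r.2)
            (PySem.List.pop? vad.keys ((pre.length : Nat) : Int))).getD vad.keys
            = pre ++ suf := by
        rw [PySem.List.pop?_natCast _ _ hlt]
        simp [herase]
      have hiff : ∀ k ∈ vad.keys,
          (k ∈ cg.getD mv PySem.Set.empty ↔ k ∈ wg.getD mv PySem.Set.empty) := by
        intro k hk
        have hc := hsub mv hmem k hk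
        constructor <;> intro h
        · exact (PySem.Set.contains_iff _ _).1 (hc ▸ (PySem.Set.contains_iff _ _).2 h)
        · exact (PySem.Set.contains_iff _ _).1 (hc ▸ (PySem.Set.contains_iff _ _).2 h)
      have hDeq := pv_decFold_congr vad hnd (cg.getD mv PySem.Set.empty)
        (wg.getD mv PySem.Set.empty) (hcgN mv) (hvw mv) hiff
      rw [pv_pairFold_eq mv]
      dsimp only
      rw [hDeq]
      set X := (wg.getD mv PySem.Set.empty).foldl
        (fun d n => if d.contains n then d.modify n 0 (fun x => x - 1) else d) vad with hX
      set cgF := (cg.getD mv PySem.Set.empty).foldl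
        (fun g n => if vad.contains n then g.modify n PySem.Set.empty
          (fun t => PySem.Set.discard t mv) else g) cg with hcgF
      have hkeysX : X.keys = vad.keys :=
        pv_keys_decFold (wg.getD mv PySem.Set.empty) (hvw mv) vad hnd
      have hcur : (X.erase mv).keys = pre ++ suf := by
        rw [pv_keys_erase, hkeysX, hsplit, List.filter_append]
        rw [pv_filter_out pre mv hpre]
        simp [pv_filter_out suf mv hsuf]
      have hcontain2 : ∀ a ∈ pre ++ suf, ∀ b ∈ pre ++ suf,
          PySem.Set.contains ((cgF.erase mv).getD a PySem.Set.empty) b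
            = PySem.Set.contains (wg.getD a PySem.Set.empty) b := by
        intro a ha b hb
        have hanem : a ≠ mv := by
          rintro rfl
          rcases List.mem_append.1 ha with h | h
          exacts [hpre h, hsuf h]
        have hbnem : b ≠ mv := by
          rintro rfl
          rcases List.mem_append.1 hb with h | h
          exacts [hpre h, hsuf h]
        rw [hcgF, pv_getD_erase_of_ne _ _ _ _ hanem,
          pv_discardFold_contains mv vad _ cg a b hbnem]
        apply hsub a ?_ b ?_
        · rw [hsplit]
          rcases List.mem_append.1 ha with h | h <;> simp [h]
        · rw [hsplit]
          rcases List.mem_append.1 hb with h | h <;> simp [h]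
      have hm2 : m - ((pre.countP
            (fun u => !PySem.Set.contains (wg.getD u PySem.Set.empty) mv) : Nat) : Int)
            - ((suf.countP
            (fun w => !PySem.Set.contains (wg.getD mv PySem.Set.empty) w) : Nat) : Int)
          = ((missCount wg (pre ++ suf) : Nat) : Int) := by
        rw [hm, hsplit, pv_missCount_middle]
        push_cast
        ring
      have hcheckeq : check_clique (cgF.erase mv) (pre ++ suf)
          = (((missCount wg (pre ++ suf) : Nat) : Int) == 0) := by
        rw [Bool.eq_iff_iff]
        rw [pv_check_clique_iff]
        rw [pv_pairwise_congr (pre ++ suf) _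
          (fun a b => PySem.Set.contains (wg.getD a PySem.Set.empty) b = true)
          (fun a ha b hb => by rw [hcontain2 a ha b hb])]
        rw [← pv_missCount_eq_zero_iff]
        simp
      rw [hi, hslice1, hslice2, pv_foldl_if_sub_one, pv_foldl_if_sub_one, hpop, hcur, hm2,
        hcheckeq]
      by_cases hcond : (!(pre ++ suf).isEmpty
          && (((missCount wg (pre ++ suf) : Nat) : Int) == 0)) = true
      · rw [if_pos hcond, if_pos hcond]
      · rw [if_neg hcond, if_neg hcond]
        have hrec := ih (cgF.erase mv) (X.erase mv)
          ((missCount wg (pre ++ suf) : Nat) : Int)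
          (by rw [hcur]; exact hps)
          (by
            intro u
            by_cases hu : u = mv
            · rw [hu, pv_getD_erase_self]
              exact List.nodup_nil
            · rw [pv_getD_erase_of_ne _ _ _ _ hu, hcgF]
              exact pv_discardFold_nodup mv vad _ cg hcgN u)
          (by
            intro u hu x hx
            rw [hcur] at hu hx
            exact hcontain2 u hu x hx)
          (by rw [hcur])
        rw [hcur] at hrec
        exact hrec

-- ---- the outer loops agree ----

theorem pv_outer_eq (wg : PySem.Dict Int (PySem.Set Int))
    (hvw : ∀ u, (wg.getD u PySem.Set.empty).Nodup) :
    ∀ (fuel : Nat) (origin : PySem.Dict Int Int) (cliques : List (List Int)),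
    origin.keys.Nodup →
    pvOuterA wg origin cliques fuel = pvOuterB wg origin cliques fuel := by
  intro fuel
  induction fuel with
  | zero => intro origin cliques _; rfl
  | succ fuel ih =>
    intro origin cliques hnd
    rw [pvOuterA, pvOuterB]
    by_cases hz : origin.size = 0
    · simp [hz]
    · rw [if_neg hz, if_neg hz]
      simp only []
      have hfuel : origin.keys.length = origin.size := by
        simp [PySem.Dict.keys, PySem.Dict.size]
      have hminit : pvInitMiss wg origin.keys 0 = ((missCount wg origin.keys : Nat) : Int) := by
        rw [pv_initMiss_eq]
        ring
      have hin := pv_inner_eq wg hvw origin.size wg origin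
        ((missCount wg origin.keys : Nat) : Int) hnd hvw
        (fun u _ x _ => rfl) rfl
      rw [hminit, hfuel, ← hin]
      cases hres : pvInnerA wg origin origin.size with
      | none => rfl
      | some cur =>
        simp only []
        rw [pv_eraseFold_eq]
        exact ih _ _ (pv_eraseFold_nodup cur origin hnd)

-- ===== VERDICT (by name: the statement is the Claim_ definition above) =====
theorem min_degree_first_clique_2_spec : Claim_equal_min_degree_first_clique_2 := by
  intro graph _
  unfold Spec_min_degree_first_clique_2 min_degree_first_clique_2 min_degree_first_clique_2_alt
  exact (pv_outer_eq (pvAdj graph) (pv_nodup_values_pvAdj graph) _ _ _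
    (pv_nodup_keys_pvDeg (pvAdj graph))).symm ▸ rfl
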